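-- pv_equiv track=rewrite | github.com/Kefitass/nooo | cartas.py | repartir_cartas
-- ===== SOURCE A (Python) =====
-- def repartir_cartas(mazo_completo):
--     """
--     Reparte las cartas del mazo en las pilas del tablero y fundaciones,
--     preparando el mazo de reserva y la pila de descarte.
--     """
--     pilas_tablero_local = [[] for _ in range(7)]
--     fundaciones_local = [[] for _ in range(4)]
--     mazo_reserva_temp_local = list(mazo_completo)
--     pila_descarte_local = []
--
--     # Reparto de las pilas del tablero
--     for i in range(7):
--         for j in range(i + 1):
--             if mazo_reserva_temp_local:
--                 carta_base = mazo_reserva_temp_local.pop(0)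
--                 # Solo la última carta en cada pila está boca arriba (j == i)
--                 pilas_tablero_local[i].append((carta_base[0], carta_base[1], j == i))
--
--     mazo_reserva_local = mazo_reserva_temp_local # Lo que queda del mazo principal
--
--     return pilas_tablero_local, fundaciones_local, mazo_reserva_local, pila_descarte_local
-- ===== SOURCE B (Python) =====
-- def repartir_cartas(mazo_completo):
--     """
--     Reparte las cartas del mazo en las pilas del tablero y fundaciones,
--     preparando el mazo de reserva y la pila de descarte.
--     """
--     mazo = list(mazo_completo)
--     pilas_tablero_local = []
--     idx = 0
--     for i in range(7):
--         pila = mazo[idx:idx + i + 1]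
--         pilas_tablero_local.append([(c[0], c[1], j == i) for j, c in enumerate(pila)])
--         idx += i + 1
--     fundaciones_local = [[] for _ in range(4)]
--     mazo_reserva_local = mazo[28:]
--     pila_descarte_local = []
--     return pilas_tablero_local, fundaciones_local, mazo_reserva_local, pila_descarte_local
-- ===== Notes on version B (the rewrite author's own statement) =====
-- stated objective: simpler
-- what changed: B replaces the destructive FIFO queue (nested loops draining a deck copy with pop(0) under an emptiness guard) by a running index with slice + enumerate: each pile is mazo[idx:idx+i+1] decorated in one comprehension, and the reserve is mazo[28:].
import Mathlib
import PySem

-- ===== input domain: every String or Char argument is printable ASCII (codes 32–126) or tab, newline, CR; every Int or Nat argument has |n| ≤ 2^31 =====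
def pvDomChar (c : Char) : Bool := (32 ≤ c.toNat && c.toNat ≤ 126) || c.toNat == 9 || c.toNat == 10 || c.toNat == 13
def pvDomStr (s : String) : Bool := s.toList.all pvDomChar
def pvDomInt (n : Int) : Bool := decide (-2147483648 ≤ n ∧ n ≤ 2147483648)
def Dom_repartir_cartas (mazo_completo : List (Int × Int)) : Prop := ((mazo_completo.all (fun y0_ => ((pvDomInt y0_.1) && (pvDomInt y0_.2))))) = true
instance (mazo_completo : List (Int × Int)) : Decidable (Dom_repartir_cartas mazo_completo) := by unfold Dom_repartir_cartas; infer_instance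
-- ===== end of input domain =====

-- B re-deals the solitaire tableau by slicing the deck at a running index (slice + enumerate per pile,
-- reserve = mazo[28:]) instead of A's nested loops draining a deck copy with pop(0) — simpler decomposition, same return value.

-- ===== PORT A =====
-- literal transliteration of A: nested for-loops draining a copy of the deck with pop(0)
def repartir_cartas (mazo_completo : List (Int × Int)) : (List (List (Int × Int × Bool))) × (List (List (Int × Int × Bool))) × (List (Int × Int)) × (List (Int × Int × Bool)) :=
  let fundaciones_local : List (List (Int × Int × Bool)) := [[], [], [], []]
  let pila_descarte_local : List (Int × Int × Bool) := []
  let st :=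
    (PySem.List.pyRange 0 7 1).foldl
      (fun (st : List (List (Int × Int × Bool)) × List (Int × Int)) i =>
        let inner :=
          (PySem.List.pyRange 0 (i + 1) 1).foldl
            (fun (p : List (Int × Int × Bool) × List (Int × Int)) j =>
              match p.2 with
              | [] => p
              | c :: rest => (p.1 ++ [(c.1, c.2, j == i)], rest))
            ([], st.2)
        (st.1 ++ [inner.1], inner.2))
      ([], mazo_completo)
  (st.1, fundaciones_local, st.2, pila_descarte_local)

-- ===== PORT B =====
-- literal transliteration of B: running index, slice + enumerate per pile, reserve = mazo[28:]
def repartir_cartas_alt (mazo_completo : List (Int × Int)) : (List (List (Int × Int × Bool))) × (List (List (Int × Int × Bool))) × (List (Int × Int)) × (List (Int × Int × Bool)) :=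
  let mazo := mazo_completo
  let st :=
    (PySem.List.pyRange 0 7 1).foldl
      (fun (st : List (List (Int × Int × Bool)) × Int) i =>
        let pila := PySem.List.slice mazo (some st.2) (some (st.2 + i + 1))
        (st.1 ++ [(PySem.List.enumerate pila 0).map (fun jc => (jc.2.1, jc.2.2, jc.1 == i))],
         st.2 + i + 1))
      ([], 0)
  let fundaciones_local : List (List (Int × Int × Bool)) := [[], [], [], []]
  let mazo_reserva_local := PySem.List.slice mazo (some 28) none
  let pila_descarte_local : List (Int × Int × Bool) := []
  (st.1, fundaciones_local, mazo_reserva_local, pila_descarte_local)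

-- ===== PRECONDITION & SPEC =====
def Spec_repartir_cartas (mazo_completo : List (Int × Int)) (out : (List (List (Int × Int × Bool))) × (List (List (Int × Int × Bool))) × (List (Int × Int)) × (List (Int × Int × Bool))) : Prop := out = repartir_cartas_alt mazo_completo
instance (mazo_completo : List (Int × Int)) (out : (List (List (Int × Int × Bool))) × (List (List (Int × Int × Bool))) × (List (Int × Int)) × (List (Int × Int × Bool))) : Decidable (Spec_repartir_cartas mazo_completo out) := by
  unfold Spec_repartir_cartas
  -- the full product type is past the default instance-search size limit; assemble the Prod instances by hand
  exact @instDecidableEqProd _ _ inferInstance (@instDecidableEqProd _ _ inferInstance (@instDecidableEqProd _ _ inferInstance inferInstance)) _ _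

-- ===== CLAIM (what is proved, stated in full; the proofs are below) =====
def Claim_equal_repartir_cartas : Prop := ∀ (mazo_completo : List (Int × Int)), Dom_repartir_cartas mazo_completo → Spec_repartir_cartas mazo_completo (repartir_cartas mazo_completo)

-- ===== LEMMAS AND PROOFS =====

lemma innerA_eq (i : Int) (js : List Int) (acc : List (Int × Int × Bool)) (rest : List (Int × Int)) :
    js.foldl
      (fun (p : List (Int × Int × Bool) × List (Int × Int)) j =>
        match p.2 with
        | [] => p
        | c :: rs => (p.1 ++ [(c.1, c.2, j == i)], rs))
      (acc, rest)
    = (acc ++ (js.zip rest).map (fun jc => (jc.2.1, jc.2.2, jc.1 == i)), rest.drop js.length) := by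
  induction js generalizing acc rest with
  | nil => simp
  | cons j js ih =>
    cases rest with
    | nil =>
      simp [List.foldl]
      have := ih acc ([] : List (Int × Int))
      simpa using this
    | cons c rs =>
      simp only [List.foldl, List.zip_cons_cons, List.map_cons, List.length_cons, List.drop_succ_cons]
      rw [ih]
      simp

lemma zip_range_eq_enum_take (n : Nat) (s : Int) (rest : List (Int × Int)) :
    (PySem.List.pyRange s (s + n) 1).zip rest = PySem.List.enumerate (rest.take n) s := by
  induction n generalizing s rest with
  | zero => simp [PySem.List.pyRange_one_eq_nil]
  | succ n ih =>
    rw [PySem.List.pyRange_one_cons (by omega)]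
    cases rest with
    | nil => simp
    | cons c rs =>
      simp only [List.zip_cons_cons, List.take_succ_cons, PySem.List.enumerate_cons]
      have := ih (s + 1) rs
      rw [show s + 1 + (n : Int) = s + ((n : Nat) + 1 : Nat) by push_cast; ring] at this
      rw [this]

lemma zip_range0_eq_enum_take (n : Nat) (rest : List (Int × Int)) :
    (PySem.List.pyRange 0 n 1).zip rest = PySem.List.enumerate (rest.take n) 0 := by
  have := zip_range_eq_enum_take n 0 rest
  simpa using this

lemma pileA_eq (i : Int) (hi : 0 ≤ i) (rest : List (Int × Int)) :
    (PySem.List.pyRange 0 (i + 1) 1).foldl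
      (fun (p : List (Int × Int × Bool) × List (Int × Int)) j =>
        match p.2 with
        | [] => p
        | c :: rs => (p.1 ++ [(c.1, c.2, j == i)], rs))
      ([], rest)
    = ((PySem.List.enumerate (rest.take (i + 1).toNat) 0).map
         (fun jc => (jc.2.1, jc.2.2, jc.1 == i)),
       rest.drop (i + 1).toNat) := by
  rw [innerA_eq]
  have hcast : i + 1 = (((i + 1).toNat : Nat) : Int) := by omega
  rw [hcast, zip_range0_eq_enum_take]
  simp [PySem.List.length_pyRange_one]
  rw [show max (i + 1) 0 = i + 1 from by omega]

-- ===== VERDICT (by name: the statement is the Claim_ definition above) =====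
theorem repartir_cartas_spec : Claim_equal_repartir_cartas := by
  intro mazo _
  unfold Spec_repartir_cartas repartir_cartas repartir_cartas_alt
  have h7 : PySem.List.pyRange 0 7 1 = [0, 1, 2, 3, 4, 5, 6] := by decide
  rw [h7]
  simp only [List.foldl]
  rw [pileA_eq 0 (by norm_num), pileA_eq 1 (by norm_num), pileA_eq 2 (by norm_num),
    pileA_eq 3 (by norm_num), pileA_eq 4 (by norm_num), pileA_eq 5 (by norm_num),
    pileA_eq 6 (by norm_num)]
  simp [PySem.List.slice_toNat, PySem.List.slice_from, List.drop_drop]
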